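-- pv_equiv track=rewrite | github.com/TurkishKEBAB/SchedularDeprecatedV1 | _deprecated/old_scripts/sef.py | parse_schedule
-- ===== SOURCE A (Python) =====
-- def parse_schedule(schedule_str):
--     s = str(schedule_str).strip()
--     if not s or s.lower() == "nan":
--         return []
--     blocks = s.split(",")
--     schedule = []
--     for block in blocks:
--         b = block.strip()
--         i = 0
--         while i < len(b):
--             if b[i] == 'T' and i + 1 < len(b) and b[i + 1] == 'h':
--                 day = "Th"
--                 i += 2
--             elif b[i] in ['M', 'W', 'F', 'T']:
--                 day = b[i]
--                 i += 1
--             else: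
--                 i += 1
--                 continue
--             hour_str = ""
--             while i < len(b) and b[i].isdigit():
--                 hour_str += b[i]
--                 i += 1
--             if hour_str:
--                 schedule.append((day, int(hour_str)))
--     return schedule
-- ===== SOURCE B (Python) =====
-- def parse_schedule(schedule_str):
--     # One forward pass with two state variables: the pending day token and the
--     # hour value accumulated digit by digit; any other character ends the token.
--     s = str(schedule_str).strip()
--     if not s or s.lower() == "nan":
--         return []
--     out = []
--     day = None
--     num = None
--     for c in s:
--         if c.isdigit() and day is not None:
--             num = (num or 0) * 10 + int(c)
--         elif c == 'h' and day == 'T' and num is None: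
--             day = 'Th'
--         else:
--             if num is not None:
--                 out.append((day, num))
--             day = c if c in 'MWFT' else None
--             num = None
--     if num is not None:
--         out.append((day, num))
--     return out
-- ===== Notes on version B (the rewrite author's own statement) =====
-- stated objective: simpler
-- what changed: Replaced the comma-split plus per-block index-cursor state machine (two-char lookahead, inner digit loop building a substring passed to int()) by one forward character pass carrying just a pending day token and an incrementally accumulated hour value, flushing a pair whenever the token ends.
import Mathlib
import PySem

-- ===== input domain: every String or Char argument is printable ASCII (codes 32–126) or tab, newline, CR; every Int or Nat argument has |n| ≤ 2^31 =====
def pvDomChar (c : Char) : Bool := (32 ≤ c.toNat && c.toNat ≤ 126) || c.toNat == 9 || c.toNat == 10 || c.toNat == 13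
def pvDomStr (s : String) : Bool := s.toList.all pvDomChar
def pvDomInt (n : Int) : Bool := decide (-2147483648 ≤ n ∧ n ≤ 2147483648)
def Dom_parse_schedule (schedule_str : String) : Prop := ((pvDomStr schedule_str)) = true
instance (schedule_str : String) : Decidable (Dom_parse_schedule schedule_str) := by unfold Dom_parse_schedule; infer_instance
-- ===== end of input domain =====

-- B replaces A's comma-split + per-block index-cursor machine by one forward pass
-- carrying a pending day token and an incrementally built hour value; objective: simpler.

-- ===== PORT A =====

def pvIsDay (c : Char) : Bool := c == 'M' || c == 'W' || c == 'F' || c == 'T'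

-- inner `while i < len(b) and b[i].isdigit()` loop: returns (hour_str, remaining suffix)
def pvCollect : List Char → List Char → List Char × List Char
  | [], acc => (acc, [])
  | c :: r, acc => if PySem.Chars.isdigit c then pvCollect r (acc ++ [c]) else (acc, c :: r)

-- int(hour_str): hand port, exact on the only shape A ever passes (a nonempty ASCII digit string)
def pvIntOfDigits (ds : List Char) : Int := ds.foldl (fun a c => a * 10 + ((c.toNat : Int) - 48)) 0

theorem pvCollect_snd_length : ∀ (r acc : List Char), (pvCollect r acc).2.length ≤ r.length := by
  intro r
  induction r with
  | nil => intro acc; simp [pvCollect]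
  | cons c r ih =>
      intro acc
      by_cases h : PySem.Chars.isdigit c
      · simpa [pvCollect, h] using Nat.le_succ_of_le (ih (acc ++ [c]))
      · simp [pvCollect, h]

-- outer `while i < len(b)` loop, cursor i represented by the remaining suffix
def pvLoopA (cs : List Char) (sched : List (String × Int)) : List (String × Int) :=
  match cs with
  | [] => sched
  | c :: rest =>
    if c = 'T' ∧ rest.head? = some 'h' then
      let p := pvCollect rest.tail []
      if p.1 ≠ [] then pvLoopA p.2 (sched ++ [("Th", pvIntOfDigits p.1)])
      else pvLoopA p.2 sched
    else if pvIsDay c then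
      let p := pvCollect rest []
      if p.1 ≠ [] then pvLoopA p.2 (sched ++ [(String.ofList [c], pvIntOfDigits p.1)])
      else pvLoopA p.2 sched
    else pvLoopA rest sched
termination_by cs.length
decreasing_by
  · have h1 := pvCollect_snd_length rest.tail []
    have h2 : rest.tail.length ≤ rest.length := by
      cases rest <;> simp
    simp only [List.length_cons]; omega
  · have h1 := pvCollect_snd_length rest.tail []
    have h2 : rest.tail.length ≤ rest.length := by
      cases rest <;> simp
    simp only [List.length_cons]; omega
  · have h1 := pvCollect_snd_length rest []
    simp only [List.length_cons]; omega
  · have h1 := pvCollect_snd_length rest []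
    simp only [List.length_cons]; omega
  · simp only [List.length_cons]; omega

def parse_schedule (schedule_str : String) : List (String × Int) :=
  let s := PySem.Str.strip schedule_str
  if s = "" ∨ PySem.Str.lower s = "nan" then []
  else
    let blocks := (PySem.Str.split? s ",").getD []    -- sep ≠ "": split? is never none here
    blocks.foldl (fun sched block => pvLoopA (PySem.Str.strip block).toList sched) []

-- ===== PORT B =====

-- the flush step of Source B (`if num is not None: out.append((day, num))` + reset target)
def pvFlush (out : List (String × Int)) (day : Option String) (num : Option Int) :
    List (String × Int) :=
  match num with
  | some n => out ++ [(day.getD "", n)]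
  | none => out

-- the for loop of Source B: state (out, day, num); the [] case is the final
-- flush after the loop. `int(c)` is ported as toNat-48, exact because
-- isdigit admits exactly the ASCII digits on the stated domain.
def pvBLoop (out : List (String × Int)) (day : Option String) (num : Option Int) :
    List Char → List (String × Int)
  | [] => pvFlush out day num
  | c :: cs =>
      if PySem.Chars.isdigit c ∧ day.isSome then
        pvBLoop out day (some (num.getD 0 * 10 + ((c.toNat : Int) - 48))) cs
      else if c = 'h' ∧ day = some "T" ∧ num = none then
        pvBLoop out (some "Th") none cs
      else
        pvBLoop (pvFlush out day num)
          (if c = 'M' ∨ c = 'W' ∨ c = 'F' ∨ c = 'T' then some (String.ofList [c]) else none)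
          none cs

def parse_schedule_alt (schedule_str : String) : List (String × Int) :=
  let s := PySem.Str.strip schedule_str
  if s = "" ∨ PySem.Str.lower s = "nan" then []
  else pvBLoop [] none none s.toList

-- ===== PRECONDITION & SPEC =====
def Spec_parse_schedule (schedule_str : String) (out : List (String × Int)) : Prop := out = parse_schedule_alt schedule_str
instance (schedule_str : String) (out : List (String × Int)) : Decidable (Spec_parse_schedule schedule_str out) := by unfold Spec_parse_schedule; infer_instance

-- ===== CLAIM (what is proved, stated in full; the proofs are below) =====
def Claim_equal_parse_schedule : Prop := ∀ (schedule_str : String), Dom_parse_schedule schedule_str → Spec_parse_schedule schedule_str (parse_schedule schedule_str)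


-- ===== LEMMAS =====

theorem pvCollect_eq : ∀ (r acc : List Char),
    pvCollect r acc = (acc ++ r.takeWhile PySem.Chars.isdigit, r.dropWhile PySem.Chars.isdigit) := by
  intro r
  induction r with
  | nil => intro acc; simp [pvCollect]
  | cons c r ih =>
      intro acc
      by_cases h : PySem.Chars.isdigit c
      · simp [pvCollect, h, ih]
      · simp [pvCollect, h]

theorem pvLoopA_cons (c : Char) (rest : List Char) (sched : List (String × Int)) :
    pvLoopA (c :: rest) sched =
      if c = 'T' ∧ rest.head? = some 'h' then
        (if rest.tail.takeWhile PySem.Chars.isdigit ≠ [] then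
           pvLoopA (rest.tail.dropWhile PySem.Chars.isdigit)
             (sched ++ [("Th", pvIntOfDigits (rest.tail.takeWhile PySem.Chars.isdigit))])
         else pvLoopA (rest.tail.dropWhile PySem.Chars.isdigit) sched)
      else if pvIsDay c then
        (if rest.takeWhile PySem.Chars.isdigit ≠ [] then
           pvLoopA (rest.dropWhile PySem.Chars.isdigit)
             (sched ++ [(String.ofList [c], pvIntOfDigits (rest.takeWhile PySem.Chars.isdigit))])
         else pvLoopA (rest.dropWhile PySem.Chars.isdigit) sched)
      else pvLoopA rest sched := by
  rw [pvLoopA]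
  simp only [pvCollect_eq, List.nil_append]

theorem pvLoopA_acc_aux : ∀ (n : Nat) (cs : List Char), cs.length ≤ n →
    ∀ sched, pvLoopA cs sched = sched ++ pvLoopA cs [] := by
  intro n
  induction n with
  | zero =>
      intro cs h sched
      have : cs = [] := by cases cs <;> simp_all
      subst this; simp [pvLoopA]
  | succ n ih =>
      intro cs h sched
      cases cs with
      | nil => simp [pvLoopA]
      | cons c rest =>
          have hr : rest.length ≤ n := by simp at h; omega
          have hrt : rest.tail.length ≤ n := by
            have : rest.tail.length ≤ rest.length := by cases rest <;> simp
            omega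
          have hd1 : (rest.tail.dropWhile PySem.Chars.isdigit).length ≤ n :=
            le_trans (List.length_dropWhile_le _ _) hrt
          have hd2 : (rest.dropWhile PySem.Chars.isdigit).length ≤ n :=
            le_trans (List.length_dropWhile_le _ _) hr
          rw [pvLoopA_cons, pvLoopA_cons]
          split_ifs with h1 h2 h3 h4
          · rw [ih _ hd1, ih _ hd1 ([] ++ _), List.nil_append, List.append_assoc]
          · rw [ih _ hd1]
          · rw [ih _ hd2, ih _ hd2 ([] ++ _), List.nil_append, List.append_assoc]
          · rw [ih _ hd2]
          · exact ih _ hr sched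

theorem pvLoopA_acc (cs : List Char) (sched : List (String × Int)) :
    pvLoopA cs sched = sched ++ pvLoopA cs [] :=
  pvLoopA_acc_aux cs.length cs le_rfl sched

-- pvF: A's parse of a raw character suffix (proof-side abbreviation)
def pvF (cs : List Char) : List (String × Int) := pvLoopA cs []

theorem isdigit_not_day {c : Char} (h : PySem.Chars.isdigit c = true) : pvIsDay c = false := by
  by_contra hc
  have hc' : pvIsDay c = true := by simpa using hc
  simp [pvIsDay] at hc'
  rcases hc' with ((rfl | rfl) | rfl) | rfl <;> simp [PySem.Chars.isdigit] at h

theorem isdigit_ne_h {c : Char} (h : PySem.Chars.isdigit c = true) : c ≠ 'h' := by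
  rintro rfl
  simp [PySem.Chars.isdigit] at h

theorem pvF_cons_nonday {c : Char} (h : pvIsDay c = false) (cs : List Char) :
    pvF (c :: cs) = pvF cs := by
  have hT : ¬(c = 'T' ∧ cs.head? = some 'h') := by
    rintro ⟨rfl, -⟩; simp [pvIsDay] at h
  unfold pvF
  rw [pvLoopA_cons]
  simp [hT, h]

theorem pvF_cons_Th (rest : List Char) :
    pvF ('T' :: 'h' :: rest) =
      if rest.takeWhile PySem.Chars.isdigit ≠ [] then
        ("Th", pvIntOfDigits (rest.takeWhile PySem.Chars.isdigit)) ::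
          pvF (rest.dropWhile PySem.Chars.isdigit)
      else pvF (rest.dropWhile PySem.Chars.isdigit) := by
  unfold pvF
  rw [pvLoopA_cons]
  simp only [List.head?_cons, List.tail_cons, and_self, if_true]
  split_ifs with h1
  · rw [pvLoopA_acc]; rfl
  · rfl

theorem pvF_cons_day {c : Char} (hday : pvIsDay c = true) (cs : List Char)
    (hne : ¬(c = 'T' ∧ cs.head? = some 'h')) :
    pvF (c :: cs) =
      if cs.takeWhile PySem.Chars.isdigit ≠ [] then
        (String.ofList [c], pvIntOfDigits (cs.takeWhile PySem.Chars.isdigit)) ::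
          pvF (cs.dropWhile PySem.Chars.isdigit)
      else pvF (cs.dropWhile PySem.Chars.isdigit) := by
  unfold pvF
  rw [pvLoopA_cons]
  simp only [hne, if_false, hday, if_true]
  split_ifs with h1
  · rw [pvLoopA_acc]; rfl
  · rfl

theorem pvF_skip {ws : List Char} (h : ∀ x ∈ ws, pvIsDay x = false) (cs : List Char) :
    pvF (ws ++ cs) = pvF cs := by
  induction ws with
  | nil => rfl
  | cons w ws ih =>
      rw [List.cons_append, pvF_cons_nonday (h w (by simp)) _]
      exact ih (fun x hx => h x (by simp [hx]))

theorem pvTakeWhile_append {p : Char → Bool} {c : Char} (hc : p c = false)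
    (xs ys : List Char) : (xs ++ c :: ys).takeWhile p = xs.takeWhile p := by
  induction xs with
  | nil => simp [List.takeWhile_cons, hc]
  | cons x xs ih =>
      by_cases hx : p x <;> simp [List.takeWhile_cons, hx, ih]

theorem pvDropWhile_append {p : Char → Bool} {c : Char} (hc : p c = false)
    (xs ys : List Char) : (xs ++ c :: ys).dropWhile p = xs.dropWhile p ++ c :: ys := by
  induction xs with
  | nil => simp [List.dropWhile_cons, hc]
  | cons x xs ih =>
      by_cases hx : p x <;> simp [List.dropWhile_cons, hx, ih]

theorem pvDropWhile_of_takeWhile_nil {p : Char → Bool} {l : List Char}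
    (h : l.takeWhile p = []) : l.dropWhile p = l := by
  cases l with
  | nil => rfl
  | cons x xs =>
      by_cases hx : p x
      · simp [List.takeWhile_cons, hx] at h
      · simp [List.dropWhile_cons, hx]

-- characters that can never take part in a match: they cut the string into independent pieces
def pvSep (c : Char) : Prop :=
  PySem.Chars.isdigit c = false ∧ pvIsDay c = false ∧ c ≠ 'h'

theorem pvF_sep_aux {c : Char} (hc : pvSep c) :
    ∀ (n : Nat) (xs : List Char), xs.length ≤ n →
      ∀ ys, pvF (xs ++ c :: ys) = pvF xs ++ pvF ys := by
  obtain ⟨hcd, hcday, hch⟩ := hc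
  intro n
  induction n with
  | zero =>
      intro xs h ys
      have : xs = [] := by cases xs <;> simp_all
      subst this
      rw [List.nil_append, pvF_cons_nonday hcday]
      simp [pvF, pvLoopA]
  | succ n ih =>
      intro xs h ys
      cases xs with
      | nil =>
          rw [List.nil_append, pvF_cons_nonday hcday]
          simp [pvF, pvLoopA]
      | cons x xs' =>
          have hx' : xs'.length ≤ n := by simp at h; omega
          have hxd : (xs'.dropWhile PySem.Chars.isdigit).length ≤ n :=
            le_trans (List.length_dropWhile_le _ _) hx'
          by_cases hTh : x = 'T' ∧ xs'.head? = some 'h'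
          · obtain ⟨rfl, hh⟩ := hTh
            obtain ⟨xs'', rfl⟩ : ∃ t, xs' = 'h' :: t := by
              cases xs' with
              | nil => simp at hh
              | cons z zs => simp at hh; exact ⟨zs, by rw [hh]⟩
            have hx'' : xs''.length ≤ n := by simp at h; omega
            have hxd'' : (xs''.dropWhile PySem.Chars.isdigit).length ≤ n :=
              le_trans (List.length_dropWhile_le _ _) hx''
            rw [List.cons_append, List.cons_append, pvF_cons_Th, pvF_cons_Th,
                pvTakeWhile_append hcd, pvDropWhile_append hcd]
            split_ifs with h1
            · rw [ih _ hxd'']; rfl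
            · rw [pvDropWhile_of_takeWhile_nil (not_ne_iff.mp h1), ih _ hx'']
          · by_cases hday : pvIsDay x
            · have hne : ¬(x = 'T' ∧ (xs' ++ c :: ys).head? = some 'h') := by
                rintro ⟨rfl, hh⟩
                cases xs' with
                | nil => simp at hh; exact hch hh
                | cons z zs => exact hTh ⟨rfl, by simpa using hh⟩
              rw [List.cons_append, pvF_cons_day hday _ hne, pvF_cons_day hday _ hTh,
                  pvTakeWhile_append hcd, pvDropWhile_append hcd]
              split_ifs with h1
              · rw [ih _ hxd]; rfl
              · rw [pvDropWhile_of_takeWhile_nil (not_ne_iff.mp h1), ih _ hx']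
            · have hday' : pvIsDay x = false := by simpa using hday
              rw [List.cons_append, pvF_cons_nonday hday', pvF_cons_nonday hday', ih _ hx']

theorem pvF_sep {c : Char} (hc : pvSep c) (xs ys : List Char) :
    pvF (xs ++ c :: ys) = pvF xs ++ pvF ys :=
  pvF_sep_aux hc xs.length xs le_rfl ys

theorem pvIntOfDigits_foldl : ∀ (ds : List Char) (a : Int),
    ds.foldl (fun a c => a * 10 + ((c.toNat : Int) - 48)) a =
      a * 10 ^ ds.length + pvIntOfDigits ds := by
  intro ds
  induction ds with
  | nil => intro a; simp [pvIntOfDigits]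
  | cons c ds ih =>
      intro a
      have h1 := ih (a * 10 + ((c.toNat : Int) - 48))
      have h2 := ih ((0 : Int) * 10 + ((c.toNat : Int) - 48))
      simp only [List.foldl_cons, pvIntOfDigits] at *
      rw [h1, h2, List.length_cons, pow_succ]
      ring

theorem pvIntOfDigits_cons (c : Char) (ds : List Char) :
    pvIntOfDigits (c :: ds) = ((c.toNat : Int) - 48) * 10 ^ ds.length + pvIntOfDigits ds := by
  have := pvIntOfDigits_foldl ds ((0 : Int) * 10 + ((c.toNat : Int) - 48))
  simp only [pvIntOfDigits, List.foldl_cons] at *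
  rw [this]; ring

-- B's loop only ever appends to out
theorem pvBLoop_acc : ∀ (cs : List Char) (out : List (String × Int)) (day : Option String)
    (num : Option Int), pvBLoop out day num cs = out ++ pvBLoop [] day num cs := by
  intro cs
  induction cs with
  | nil =>
      intro out day num
      cases num <;> simp [pvBLoop, pvFlush]
  | cons c cs ih =>
      intro out day num
      rw [pvBLoop, pvBLoop]
      by_cases h1 : PySem.Chars.isdigit c = true ∧ day.isSome = true
      · rw [if_pos h1, if_pos h1]; exact ih out day _
      · rw [if_neg h1, if_neg h1]
        by_cases h2 : c = 'h' ∧ day = some "T" ∧ num = none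
        · rw [if_pos h2, if_pos h2]; exact ih out (some "Th") none
        · rw [if_neg h2, if_neg h2]
          cases num with
          | none => simp only [pvFlush]; exact ih out _ none
          | some n => simp only [pvFlush]; rw [ih (out ++ _), ih ([] ++ _)]; simp

-- after a flush/reset on character c, B's state is exactly A's parse of c :: cs
theorem pvBReset (c : Char) (cs : List Char)
    (h1 : pvBLoop [] none none cs = pvF cs)
    (h2 : ∀ d : String, d = "M" ∨ d = "W" ∨ d = "F" ∨ d = "T" ∨ d = "Th" →
        pvBLoop [] (some d) none cs = pvF (d.toList ++ cs)) :
    pvBLoop []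
      (if c = 'M' ∨ c = 'W' ∨ c = 'F' ∨ c = 'T' then some (String.ofList [c]) else none)
      none cs = pvF (c :: cs) := by
  by_cases hM : c = 'M' ∨ c = 'W' ∨ c = 'F' ∨ c = 'T'
  · rw [if_pos hM]
    rcases hM with rfl | rfl | rfl | rfl
    · rw [h2 (String.ofList ['M']) (by decide)]; rfl
    · rw [h2 (String.ofList ['W']) (by decide)]; rfl
    · rw [h2 (String.ofList ['F']) (by decide)]; rfl
    · rw [h2 (String.ofList ['T']) (by decide)]; rfl
  · rw [if_neg hM, h1, pvF_cons_nonday]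
    push_neg at hM
    simp [pvIsDay]
    exact ⟨⟨⟨hM.1, hM.2.1⟩, hM.2.2.1⟩, hM.2.2.2⟩

-- main invariant: B's loop from each reachable state, against A's suffix parse pvF
theorem pvBMain : ∀ cs : List Char,
    (pvBLoop [] none none cs = pvF cs) ∧
    (∀ d : String, d = "M" ∨ d = "W" ∨ d = "F" ∨ d = "T" ∨ d = "Th" →
        pvBLoop [] (some d) none cs = pvF (d.toList ++ cs)) ∧
    (∀ (d : String) (v : Int),
        pvBLoop [] (some d) (some v) cs =
          (d, v * 10 ^ (cs.takeWhile PySem.Chars.isdigit).length +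
              pvIntOfDigits (cs.takeWhile PySem.Chars.isdigit)) ::
            pvF (cs.dropWhile PySem.Chars.isdigit)) := by
  intro cs
  induction cs with
  | nil =>
      refine ⟨by simp [pvBLoop, pvFlush, pvF, pvLoopA], ?_, ?_⟩
      · intro d hd
        rcases hd with rfl | rfl | rfl | rfl | rfl <;>
          simp [pvBLoop, pvFlush, pvF, pvLoopA, pvCollect, pvIsDay]
      · intro d v
        simp [pvBLoop, pvFlush, pvIntOfDigits, pvF, pvLoopA]
  | cons c cs ih =>
      obtain ⟨ih1, ih2, ih3⟩ := ih
      by_cases hdg : PySem.Chars.isdigit c = true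
      · -- c is a digit
        have hnh : c ≠ 'h' := isdigit_ne_h hdg
        have hnday : pvIsDay c = false := isdigit_not_day hdg
        have htw : (c :: cs).takeWhile PySem.Chars.isdigit =
            c :: cs.takeWhile PySem.Chars.isdigit := by simp [List.takeWhile_cons, hdg]
        have hdw : (c :: cs).dropWhile PySem.Chars.isdigit =
            cs.dropWhile PySem.Chars.isdigit := by simp [List.dropWhile_cons, hdg]
        have hval : (0 : Int) * 10 + ((c.toNat : Int) - 48) = (c.toNat : Int) - 48 := by ring
        refine ⟨?_, ?_, ?_⟩
        · -- state (none, none): digit ignored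
          rw [pvBLoop]
          rw [if_neg (by rintro ⟨-, h⟩; simp at h),
            if_neg (by rintro ⟨rfl, -⟩; exact hnh rfl)]
          rw [pvFlush, pvBReset c cs ih1 ih2, pvF_cons_nonday hnday]
        · -- state (some d, none): start the hour
          intro d hd
          rw [pvBLoop, if_pos ⟨hdg, rfl⟩]
          rw [show (none : Option Int).getD 0 = 0 from rfl]
          rw [ih3 d (0 * 10 + ((c.toNat : Int) - 48))]
          rcases hd with rfl | rfl | rfl | rfl | rfl
          · rw [show ("M" : String).toList = ['M'] from rfl, List.cons_append, List.nil_append,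
              pvF_cons_day (c := 'M') (by decide) _ (by rintro ⟨h, -⟩; exact absurd h (by decide)),
              if_pos (by simp [htw]), htw, hdw, pvIntOfDigits_cons]
            simp only [List.cons.injEq, Prod.mk.injEq]
            exact ⟨⟨by decide, by rw [hval]⟩, trivial⟩
          · rw [show ("W" : String).toList = ['W'] from rfl, List.cons_append, List.nil_append,
              pvF_cons_day (c := 'W') (by decide) _ (by rintro ⟨h, -⟩; exact absurd h (by decide)),
              if_pos (by simp [htw]), htw, hdw, pvIntOfDigits_cons]
            simp only [List.cons.injEq, Prod.mk.injEq]
            exact ⟨⟨by decide, by rw [hval]⟩, trivial⟩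
          · rw [show ("F" : String).toList = ['F'] from rfl, List.cons_append, List.nil_append,
              pvF_cons_day (c := 'F') (by decide) _ (by rintro ⟨h, -⟩; exact absurd h (by decide)),
              if_pos (by simp [htw]), htw, hdw, pvIntOfDigits_cons]
            simp only [List.cons.injEq, Prod.mk.injEq]
            exact ⟨⟨by decide, by rw [hval]⟩, trivial⟩
          · -- "T": the next char is a digit, so the 'Th' lookahead fails
            rw [show ("T" : String).toList = ['T'] from rfl, List.cons_append, List.nil_append,
              pvF_cons_day (c := 'T') (by decide) _ (by rintro ⟨-, hh⟩; simp at hh; exact hnh hh),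
              if_pos (by simp [htw]), htw, hdw, pvIntOfDigits_cons]
            simp only [List.cons.injEq, Prod.mk.injEq]
            exact ⟨⟨by decide, by rw [hval]⟩, trivial⟩
          · -- "Th"
            rw [show ("Th" : String).toList = ['T', 'h'] from rfl, List.cons_append,
              List.cons_append, List.nil_append, pvF_cons_Th,
              if_pos (by simp [htw]), htw, hdw, pvIntOfDigits_cons]
            simp only [List.cons.injEq, Prod.mk.injEq]
            exact ⟨⟨trivial, by rw [hval]⟩, trivial⟩
        · -- state (some d, some v): extend the hour
          intro d v
          rw [pvBLoop, if_pos ⟨hdg, rfl⟩]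
          rw [show (some v).getD 0 = v from rfl]
          rw [ih3 d (v * 10 + ((c.toNat : Int) - 48)), htw, hdw]
          simp only [List.cons.injEq, Prod.mk.injEq]
          exact ⟨⟨trivial, by rw [List.length_cons, pvIntOfDigits_cons, pow_succ]; ring⟩, trivial⟩
      · -- c is not a digit
        have hdg' : PySem.Chars.isdigit c = false := by simpa using hdg
        have htw : (c :: cs).takeWhile PySem.Chars.isdigit = [] := by
          simp [List.takeWhile_cons, hdg']
        have hdw : (c :: cs).dropWhile PySem.Chars.isdigit = c :: cs := by
          simp [List.dropWhile_cons, hdg']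
        refine ⟨?_, ?_, ?_⟩
        · -- state (none, none): plain reset on c
          rw [pvBLoop]
          rw [if_neg (by rintro ⟨-, h⟩; simp at h),
            if_neg (by rintro ⟨-, h, -⟩; simp at h)]
          rw [pvFlush]
          exact pvBReset c cs ih1 ih2
        · -- state (some d, none)
          intro d hd
          by_cases hh : c = 'h' ∧ d = "T"
          · -- upgrade T -> Th
            obtain ⟨rfl, rfl⟩ := hh
            rw [pvBLoop]
            rw [if_neg (by rintro ⟨h, -⟩; rw [hdg'] at h; exact absurd h (by simp)),
              if_pos ⟨rfl, rfl, rfl⟩]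
            rw [ih2 "Th" (by simp)]
            rfl
          · -- flush (nothing pending) and reset
            rw [pvBLoop]
            rw [if_neg (by rintro ⟨h, -⟩; rw [hdg'] at h; exact absurd h (by simp)),
              if_neg (by rintro ⟨hc', hd', -⟩; exact hh ⟨hc', by injection hd'⟩)]
            rw [pvFlush, pvBReset c cs ih1 ih2]
            -- pvF (d.toList ++ c :: cs) = pvF (c :: cs): the day has no digits after it
            rcases hd with rfl | rfl | rfl | rfl | rfl
            · rw [show ("M" : String).toList = ['M'] from rfl, List.cons_append, List.nil_append,
                pvF_cons_day (c := 'M') (by decide) _ (by rintro ⟨h, -⟩; exact absurd h (by decide)),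
                if_neg (not_ne_iff.mpr htw), pvDropWhile_of_takeWhile_nil htw]
            · rw [show ("W" : String).toList = ['W'] from rfl, List.cons_append, List.nil_append,
                pvF_cons_day (c := 'W') (by decide) _ (by rintro ⟨h, -⟩; exact absurd h (by decide)),
                if_neg (not_ne_iff.mpr htw), pvDropWhile_of_takeWhile_nil htw]
            · rw [show ("F" : String).toList = ['F'] from rfl, List.cons_append, List.nil_append,
                pvF_cons_day (c := 'F') (by decide) _ (by rintro ⟨h, -⟩; exact absurd h (by decide)),
                if_neg (not_ne_iff.mpr htw), pvDropWhile_of_takeWhile_nil htw]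
            · -- d = "T": here c ≠ 'h', so no 'Th' lookahead
              have hch : c ≠ 'h' := fun hc' => hh ⟨hc', rfl⟩
              rw [show ("T" : String).toList = ['T'] from rfl, List.cons_append, List.nil_append,
                pvF_cons_day (c := 'T') (by decide) _ (by rintro ⟨-, hh'⟩; simp at hh'; exact hch hh'),
                if_neg (not_ne_iff.mpr htw), pvDropWhile_of_takeWhile_nil htw]
            · rw [show ("Th" : String).toList = ['T', 'h'] from rfl, List.cons_append,
                List.cons_append, List.nil_append, pvF_cons_Th,
                if_neg (not_ne_iff.mpr htw), pvDropWhile_of_takeWhile_nil htw]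
        · -- state (some d, some v): flush (d, v) and reset
          intro d v
          rw [pvBLoop]
          rw [if_neg (by rintro ⟨h, -⟩; rw [hdg'] at h; exact absurd h (by simp)),
            if_neg (by rintro ⟨-, -, h⟩; exact absurd h (by simp))]
          rw [pvFlush, pvBLoop_acc, pvBReset c cs ih1 ih2, htw, hdw]
          simp [pvIntOfDigits]

-- simple accumulator model of s.split(","), cur is the current piece reversed
def pvMySplit : List Char → List Char → List (List Char)
  | cur, [] => [cur.reverse]
  | cur, c :: r => if c = ',' then cur.reverse :: pvMySplit [] r else pvMySplit (c :: cur) r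

theorem pvSplitOn_go : ∀ (fuel : Nat) (l cur : List Char) (acc : List (List Char)),
    l.length < fuel →
      PySem.Chars.splitOn.go [','] fuel l cur acc = acc.reverse ++ pvMySplit cur l := by
  intro fuel
  induction fuel with
  | zero => intro l cur acc h; omega
  | succ fuel ih =>
      intro l cur acc h
      cases l with
      | nil => simp [PySem.Chars.splitOn.go, pvMySplit]
      | cons c rest =>
          rw [PySem.Chars.splitOn.go]
          by_cases hc : c = ','
          · subst hc
            have hpre : List.isPrefixOf [','] (',' :: rest) = true := by
              simp [List.isPrefixOf]
            simp only [hpre, if_true, List.length_cons, List.drop_succ_cons, List.drop_zero, List.length_nil]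
            rw [ih rest [] _ (by simp at h; omega)]
            simp [pvMySplit]
          · have hpre : List.isPrefixOf [','] (c :: rest) = false := by
              simp [List.isPrefixOf]
              exact fun hh => hc hh.symm
            simp only [hpre, Bool.false_eq_true, if_false]
            rw [ih rest (c :: cur) acc (by simp at h; omega)]
            simp [pvMySplit, hc]

theorem pvSplitOn_eq (s : List Char) :
    PySem.Chars.splitOn s [','] = pvMySplit [] s := by
  unfold PySem.Chars.splitOn
  rw [pvSplitOn_go (s.length + 1) s [] [] (by omega)]
  rfl

theorem pvSep_comma : pvSep ',' := by
  refine ⟨by decide, by decide, by decide⟩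

theorem pvF_mySplit : ∀ (l cur : List Char),
    (pvMySplit cur l).flatMap pvF = pvF (cur.reverse ++ l) := by
  intro l
  induction l with
  | nil => intro cur; simp [pvMySplit]
  | cons c r ih =>
      intro cur
      by_cases hc : c = ','
      · subst hc
        simp only [pvMySplit, reduceIte, List.flatMap_cons]
        rw [ih []]
        simp only [List.reverse_nil, List.nil_append]
        rw [pvF_sep pvSep_comma]
      · simp only [pvMySplit, hc, if_false]
        rw [ih (c :: cur)]
        simp

theorem isspace_not_day {x : Char} (h : PySem.Chars.isspace x = true) : pvIsDay x = false := by
  by_contra hc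
  have hc' : pvIsDay x = true := by simpa using hc
  simp [pvIsDay] at hc'
  rcases hc' with ((rfl | rfl) | rfl) | rfl <;> simp [PySem.Chars.isspace] at h

theorem isspace_sep {x : Char} (h : PySem.Chars.isspace x = true) : pvSep x := by
  refine ⟨?_, isspace_not_day h, ?_⟩
  · by_contra hd
    have hd' : PySem.Chars.isdigit x = true := by simpa using hd
    simp [PySem.Chars.isdigit] at hd'
    have : x.toNat = 32 ∨ (9 ≤ x.toNat ∧ x.toNat ≤ 13) ∨ (28 ≤ x.toNat ∧ x.toNat ≤ 31) ∨
        133 ≤ x.toNat := by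
      simp [PySem.Chars.isspace] at h
      omega
    have hle : 48 ≤ x.toNat ∧ x.toNat ≤ 57 :=
      ⟨Nat.succ_le_of_lt hd'.1, Fin.mk_le_mk.mp hd'.2⟩
    omega
  · rintro rfl
    simp [PySem.Chars.isspace] at h

theorem pvF_all_space {ws : List Char} (h : ∀ x ∈ ws, PySem.Chars.isspace x = true) :
    pvF ws = [] := by
  have := pvF_skip (ws := ws) (fun x hx => isspace_not_day (h x hx)) []
  simpa [pvF, pvLoopA] using this

theorem pvF_lstrip (b : List Char) : pvF (PySem.Chars.lstrip b) = pvF b := by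
  unfold PySem.Chars.lstrip
  conv_rhs => rw [← List.takeWhile_append_dropWhile (p := PySem.Chars.isspace) (l := b)]
  rw [pvF_skip (fun x hx => isspace_not_day (List.mem_takeWhile_imp hx))]

theorem pvF_rstrip (b : List Char) : pvF (PySem.Chars.rstrip b) = pvF b := by
  unfold PySem.Chars.rstrip
  have hsplit : b = (b.reverse.dropWhile PySem.Chars.isspace).reverse ++
      (b.reverse.takeWhile PySem.Chars.isspace).reverse := by
    conv_lhs => rw [← List.reverse_reverse b,
      ← List.takeWhile_append_dropWhile (p := PySem.Chars.isspace) (l := b.reverse)]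
    rw [List.reverse_append]
  have hws : ∀ x ∈ (b.reverse.takeWhile PySem.Chars.isspace).reverse,
      PySem.Chars.isspace x = true := by
    intro x hx
    exact List.mem_takeWhile_imp (List.mem_reverse.mp hx)
  conv_rhs => rw [hsplit]
  cases hcase : (b.reverse.takeWhile PySem.Chars.isspace).reverse with
  | nil => simp
  | cons w ws =>
      rw [hcase] at hws
      rw [pvF_sep (isspace_sep (hws w (List.mem_cons_self))),
        pvF_all_space (fun x hx => hws x (List.mem_cons_of_mem _ hx))]
      simp

theorem pvF_strip (b : List Char) : pvF (PySem.Chars.strip b) = pvF b := by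
  unfold PySem.Chars.strip
  rw [pvF_rstrip, pvF_lstrip]

theorem pvFoldBlocks : ∀ (bs : List (List Char)) (sched : List (String × Int)),
    bs.foldl (fun sched b => pvLoopA (PySem.Chars.strip b) sched) sched =
      sched ++ bs.flatMap pvF := by
  intro bs
  induction bs with
  | nil => intro sched; simp
  | cons b bs ih =>
      intro sched
      simp only [List.foldl_cons, List.flatMap_cons]
      rw [ih, pvLoopA_acc]
      have : pvLoopA (PySem.Chars.strip b) [] = pvF b := pvF_strip b
      rw [this, List.append_assoc]

-- ===== VERDICT (by name: the statement is the Claim_ definition above) =====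
theorem parse_schedule_spec : Claim_equal_parse_schedule := by
  unfold Claim_equal_parse_schedule Spec_parse_schedule
  intro s _
  unfold parse_schedule parse_schedule_alt
  by_cases hg : PySem.Str.strip s = "" ∨ PySem.Str.lower (PySem.Str.strip s) = "nan"
  · simp only [hg, if_true]
  · simp only [hg, if_false]
    have hsplit : PySem.Str.split? (PySem.Str.strip s) "," =
        some (List.map String.ofList
          (PySem.Chars.splitOn (PySem.Str.strip s).toList [','])) := by
      simp [PySem.Str.split?, PySem.Chars.split?]
    rw [hsplit]
    simp only [Option.getD_some]
    rw [List.foldl_map]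
    have hbody : ∀ (sched : List (String × Int)) (b : List Char),
        pvLoopA (PySem.Str.strip (String.ofList b)).toList sched =
          pvLoopA (PySem.Chars.strip b) sched := by
      intro sched b
      rw [PySem.Str.toList_strip, String.toList_ofList]
    simp only [hbody]
    rw [pvFoldBlocks, pvSplitOn_eq, pvF_mySplit, (pvBMain _).1]
    simp
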